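-- pv_equiv track=rewrite | github.com/Polariche/algorithms | codeforces/964/D.py | solve
-- ===== SOURCE A (Python) =====
-- def solve(s,t):
--     ans = []
--     j=0
--     for i in range(len(t)):
--         if j >= len(s):
--             return False, ''
--         while not(s[j] == '?' or s[j]==t[i]):
--             ans.append(s[j])
--             j+=1
--             if j>=len(s):
--                 return False, ''
--         ans.append(t[i])
--         j+=1
--     if j<len(s):
--         for r in s[j:]:
--             if r == '?':
--                 ans.append('a')
--             else:
--                 ans.append(r)
--     return True, ''.join(ans)
-- ===== SOURCE B (Python) =====
-- def solve(s, t):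
--     ans = []
--     i = 0
--     for c in s:
--         if i < len(t) and (c == '?' or c == t[i]):
--             ans.append(t[i])
--             i += 1
--         else:
--             ans.append('a' if c == '?' else c)
--     if i < len(t):
--         return False, ''
--     return True, ''.join(ans)
-- ===== Notes on version B (the rewrite author's own statement) =====
-- stated objective: simpler
-- what changed: Replaced A's loop over t with a nested while-scan of s and a separate trailing remainder pass by a single flat loop over s carrying one pointer into t, with the '?'-default folded into the same loop.
import Mathlib
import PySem

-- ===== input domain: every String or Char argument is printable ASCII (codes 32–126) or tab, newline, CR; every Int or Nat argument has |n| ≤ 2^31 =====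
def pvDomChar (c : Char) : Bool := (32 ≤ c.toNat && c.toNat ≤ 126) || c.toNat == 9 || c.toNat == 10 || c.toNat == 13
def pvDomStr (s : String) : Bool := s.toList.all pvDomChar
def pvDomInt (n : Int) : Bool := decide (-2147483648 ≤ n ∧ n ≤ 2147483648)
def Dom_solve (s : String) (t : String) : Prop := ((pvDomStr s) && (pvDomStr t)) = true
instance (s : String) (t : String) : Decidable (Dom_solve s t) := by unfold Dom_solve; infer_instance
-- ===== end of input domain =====

-- B replaces A's loop-over-t with nested while-scan of s (plus a trailing remainder pass)
-- by one flat loop over s with a single pointer into t; same result, simpler shape.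

-- ===== PORT A =====
-- inner `while not(s[j]=='?' or s[j]==t[i])` of A; the final append of t[i] and j+=1
-- (the lines right after the while) are the `some` result. `none` = `return False, ''`.
def solveInnerA (sl : List Char) (c : Char) (j : Nat) (ans : List Char) :
    Option (List Char × Nat) :=
  if h : j < sl.length then
    if sl[j] = '?' ∨ sl[j] = c then some (ans ++ [c], j + 1)
    else if j + 1 < sl.length then solveInnerA sl c (j + 1) (ans ++ [sl[j]])
    else none
  else none
termination_by sl.length - j

-- `for i in range(len(t))` of A, recursion over the chars of t with state (j, ans)
def solveLoopA (sl : List Char) (tl : List Char) (j : Nat) (ans : List Char) :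
    Bool × List Char :=
  match tl with
  | [] =>
    if j < sl.length then
      (true, ans ++ (sl.drop j).map (fun r => if r = '?' then 'a' else r))
    else (true, ans)
  | c :: rest =>
    if j < sl.length then
      match solveInnerA sl c j ans with
      | none => (false, [])
      | some (ans', j') => solveLoopA sl rest j' ans'
    else (false, [])

def solve (s : String) (t : String) : Bool × String :=
  let r := solveLoopA s.toList t.toList 0 []
  (r.1, String.ofList r.2)

-- ===== PORT B =====
-- single `for c in s` of B; the remaining (unconsumed) part of t plays the pointer i
def solveLoopB (sl : List Char) (tl : List Char) (ans : List Char) : Bool × List Char :=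
  match sl with
  | [] => if tl ≠ [] then (false, []) else (true, ans)
  | c :: cs =>
    match tl with
    | d :: ds =>
      if c = '?' ∨ c = d then solveLoopB cs ds (ans ++ [d])
      else solveLoopB cs (d :: ds) (ans ++ [if c = '?' then 'a' else c])
    | [] => solveLoopB cs [] (ans ++ [if c = '?' then 'a' else c])

def solve_alt (s : String) (t : String) : Bool × String :=
  let r := solveLoopB s.toList t.toList []
  (r.1, String.ofList r.2)

-- ===== PRECONDITION & SPEC =====
def Spec_solve (s : String) (t : String) (out : Bool × String) : Prop := out = solve_alt s t
instance (s : String) (t : String) (out : Bool × String) : Decidable (Spec_solve s t out) := by unfold Spec_solve; infer_instance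

-- ===== CLAIM (what is proved, stated in full; the proofs are below) =====
def Claim_equal_solve : Prop := ∀ (s : String) (t : String), Dom_solve s t → Spec_solve s t (solve s t)

-- ===== LEMMAS AND PROOFS =====

lemma loopB_nil (sl ans : List Char) :
    solveLoopB sl [] ans = (true, ans ++ sl.map (fun r => if r = '?' then 'a' else r)) := by
  induction sl generalizing ans with
  | nil => simp [solveLoopB]
  | cons c cs ih => simp [solveLoopB, ih]

lemma inner_sim (sl : List Char) (c : Char) (rest : List Char) :
    ∀ j ans, j < sl.length →
      solveLoopB (sl.drop j) (c :: rest) ans =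
        match solveInnerA sl c j ans with
        | none => (false, [])
        | some (ans', j') => solveLoopB (sl.drop j') rest ans' := by
  intro j ans hj
  induction hn : sl.length - j using Nat.strong_induction_on generalizing j ans with
  | _ n ih =>
  subst hn
  rw [List.drop_eq_getElem_cons hj]
  rw [solveInnerA]
  simp only [hj, dif_pos]
  by_cases hm : sl[j] = '?' ∨ sl[j] = c
  · simp only [if_pos hm, solveLoopB]
  · rw [if_neg hm]
    rw [not_or] at hm
    simp only [solveLoopB, hm.1, hm.2, or_self, if_false]
    by_cases hj1 : j + 1 < sl.length
    · rw [if_pos hj1]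
      exact ih (sl.length - (j+1)) (by omega) (j+1) (ans ++ [sl[j]]) hj1 rfl
    · rw [if_neg hj1]
      have : sl.drop (j+1) = [] := List.drop_eq_nil_of_le (by omega)
      simp [this, solveLoopB]

lemma loop_sim (sl : List Char) :
    ∀ tl j ans, solveLoopA sl tl j ans = solveLoopB (sl.drop j) tl ans := by
  intro tl
  induction tl with
  | nil =>
    intro j ans
    by_cases hj : j < sl.length
    · simp [solveLoopA, hj, loopB_nil]
    · have : sl.drop j = [] := List.drop_eq_nil_of_le (by omega)
      simp [solveLoopA, hj, this, loopB_nil]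
  | cons c rest ih =>
    intro j ans
    by_cases hj : j < sl.length
    · simp only [solveLoopA, if_pos hj]
      rw [inner_sim sl c rest j ans hj]
      cases solveInnerA sl c j ans with
      | none => rfl
      | some p => cases p with | mk ans' j' => simp [ih]
    · have hd : sl.drop j = [] := List.drop_eq_nil_of_le (by omega)
      simp [solveLoopA, hj, hd, solveLoopB]

-- ===== VERDICT (by name: the statement is the Claim_ definition above) =====
theorem solve_spec : Claim_equal_solve := by
  intro s t _
  unfold Spec_solve solve solve_alt
  rw [loop_sim s.toList t.toList 0 []]
  rfl
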